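-- pv_equiv track=rewrite | github.com/thealper2/codewars-solutions | 7-kyu/alternate_square_sum.py | alternate_sq_sum
-- ===== SOURCE A (Python) =====
-- def alternate_sq_sum(arr):
--     n = len(arr)
--     square_sum = 0
--     for i in range(n):
--         if i % 2 == 1:
--             square_sum += arr[i] ** 2
--         else:
--             square_sum += arr[i]
--
--     return square_sum
-- ===== SOURCE B (Python) =====
-- def alternate_sq_sum(arr):
--     return sum(arr[0::2]) + sum(x ** 2 for x in arr[1::2])
-- ===== Notes on version B (the rewrite author's own statement) =====
-- stated objective: idiomatic
-- what changed: Replaces the indexed loop with its i%2 branch by two strided slices: sum the even-index slice and the squares of the odd-index slice.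
import Mathlib
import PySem

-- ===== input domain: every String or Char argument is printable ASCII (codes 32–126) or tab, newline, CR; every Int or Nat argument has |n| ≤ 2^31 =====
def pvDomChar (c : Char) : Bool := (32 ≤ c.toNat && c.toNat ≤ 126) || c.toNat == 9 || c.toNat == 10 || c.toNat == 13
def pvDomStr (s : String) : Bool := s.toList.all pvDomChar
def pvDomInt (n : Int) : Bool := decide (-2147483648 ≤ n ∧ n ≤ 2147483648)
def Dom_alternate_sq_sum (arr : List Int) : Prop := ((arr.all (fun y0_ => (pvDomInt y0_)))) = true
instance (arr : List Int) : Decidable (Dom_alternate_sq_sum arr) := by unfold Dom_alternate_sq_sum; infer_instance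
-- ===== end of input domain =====

-- B replaces the indexed loop with its i % 2 branch by two strided slices (idiomatic decomposition; same cost).


-- ===== PORT A =====
def alternate_sq_sum (arr : List Int) : Int :=
  (PySem.List.pyRange 0 arr.length 1).foldl
    (fun square_sum i =>
      if PySem.Int.mod i 2 == 1 then square_sum + PySem.List.pyGetD arr i 0 ^ 2
      else square_sum + PySem.List.pyGetD arr i 0) 0

-- ===== PORT B =====
def alternate_sq_sum_alt (arr : List Int) : Int :=
  ((PySem.List.slice? arr (some 0) none 2).getD []).sum
    + (((PySem.List.slice? arr (some 1) none 2).getD []).map (fun x => x ^ 2)).sum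

-- ===== PRECONDITION & SPEC =====
def Spec_alternate_sq_sum (arr : List Int) (out : Int) : Prop := out = alternate_sq_sum_alt arr
instance (arr : List Int) (out : Int) : Decidable (Spec_alternate_sq_sum arr out) := by unfold Spec_alternate_sq_sum; infer_instance

-- ===== CLAIM (what is proved, stated in full; the proofs are below) =====
def Claim_equal_alternate_sq_sum : Prop := ∀ (arr : List Int), Dom_alternate_sq_sum arr → Spec_alternate_sq_sum arr (alternate_sq_sum arr)

-- ===== LEMMAS AND PROOFS =====

-- even-index elements arr[0::2] and odd-index elements arr[1::2], structurally
def pvEvens : List Int → List Int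
  | [] => []
  | [x] => [x]
  | x :: _ :: r => x :: pvEvens r

def pvOdds : List Int → List Int
  | [] => []
  | [_] => []
  | _ :: y :: r => y :: pvOdds r

lemma fmE : ∀ (xs : List Int),
    List.filterMap (fun (k : Nat) => xs[((2:Int) * (k:Int)).toNat]?) (List.range ((xs.length + 1) / 2)) = pvEvens xs := by
  intro xs
  induction xs using pvEvens.induct with
  | case1 => simp [pvEvens]
  | case2 x => simp [pvEvens, List.range_succ]
  | case3 x y r ih =>
    have hc : (((x :: y :: r).length + 1) / 2) = (r.length + 1) / 2 + 1 := by
      simp [List.length_cons]; omega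
    rw [hc, List.range_succ_eq_map, List.filterMap_cons, List.filterMap_map]
    norm_num
    rw [pvEvens, ← ih]
    have hAB : List.filterMap (fun (k : Nat) => (x :: y :: r)[((2:Int) * ((k:Int) + 1)).toNat]?)
          (List.range ((r.length + 1) / 2))
        = List.filterMap (fun (k : Nat) => r[((2:Int) * (k:Int)).toNat]?) (List.range ((r.length + 1) / 2)) := by
      apply List.filterMap_congr
      intro k _
      have h2 : ((2:Int) * ((k:Int) + 1)).toNat = ((2:Int) * (k:Int)).toNat + 2 := by omega
      simp [h2]
    rw [hAB]

lemma fmO : ∀ (xs : List Int),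
    List.filterMap (fun (k : Nat) => xs[((1:Int) + (2:Int) * (k:Int)).toNat]?) (List.range (xs.length / 2)) = pvOdds xs := by
  intro xs
  induction xs using pvOdds.induct with
  | case1 => simp [pvOdds]
  | case2 x => simp [pvOdds]
  | case3 x y r ih =>
    have hc : ((x :: y :: r).length / 2) = r.length / 2 + 1 := by
      simp [List.length_cons]; omega
    rw [hc, List.range_succ_eq_map, List.filterMap_cons, List.filterMap_map]
    norm_num
    rw [pvOdds, ← ih]
    have hAB : List.filterMap (fun (k : Nat) => (x :: y :: r)[((1:Int) + (2:Int) * ((k:Int) + 1)).toNat]?)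
          (List.range (r.length / 2))
        = List.filterMap (fun (k : Nat) => r[((1:Int) + (2:Int) * (k:Int)).toNat]?) (List.range (r.length / 2)) := by
      apply List.filterMap_congr
      intro k _
      have h2 : ((1:Int) + (2:Int) * ((k:Int) + 1)).toNat = ((1:Int) + (2:Int) * (k:Int)).toNat + 2 := by omega
      simp [h2]
    rw [hAB]

lemma sliceE (xs : List Int) : PySem.List.slice? xs (some 0) none 2 = some (pvEvens xs) := by
  simp only [PySem.List.slice?, PySem.List.sliceIndices]
  norm_num
  have hcount : (if 0 < xs.length then (((xs.length : Int) + 2 - 1) / 2).toNat else 0)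
      = (xs.length + 1) / 2 := by
    split_ifs with h
    · have h1 : ((xs.length : Int) + 2 - 1) = ((xs.length + 1 : Nat) : Int) := by push_cast; ring
      rw [h1, show (2:Int) = ((2:Nat):Int) from rfl, ← Int.natCast_div, Int.toNat_natCast]
    · omega
  rw [hcount, ← fmE xs]

lemma sliceO (xs : List Int) : PySem.List.slice? xs (some 1) none 2 = some (pvOdds xs) := by
  simp only [PySem.List.slice?, PySem.List.sliceIndices]
  norm_num
  cases xs with
  | nil => simp [pvOdds]
  | cons a t =>
    have hmin : min (1:Int) (((a :: t).length : Int)) = 1 := by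
      simp [List.length_cons]
    have hcount : (if 1 < (a :: t).length
          then ((((a :: t).length : Int) - min 1 (((a :: t).length : Int)) + 2 - 1) / 2).toNat else 0)
        = (a :: t).length / 2 := by
      rw [hmin]
      split_ifs with h
      · have h1 : (((a :: t).length : Int) - 1 + 2 - 1) = (((a :: t).length : Nat) : Int) := by ring
        rw [h1, show (2:Int) = ((2:Nat):Int) from rfl, ← Int.natCast_div, Int.toNat_natCast]
      · have ht : t.length = 0 := by rw [List.length_cons] at h; omega
        simp [ht]
    rw [hcount, hmin, ← fmO (a :: t)]

-- A's loop, with the accumulator generalized, computes the even-index sum plus odd-index square sum.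
lemma loopA : ∀ (arr : List Int) (init : Int),
    (PySem.List.pyRange 0 arr.length 1).foldl
      (fun square_sum i =>
        if PySem.Int.mod i 2 == 1 then square_sum + PySem.List.pyGetD arr i 0 ^ 2
        else square_sum + PySem.List.pyGetD arr i 0) init
    = init + (pvEvens arr).sum + ((pvOdds arr).map (fun x => x ^ 2)).sum := by
  intro arr
  induction arr using pvEvens.induct with
  | case1 => intro init; simp [pvEvens, pvOdds]
  | case2 x =>
    intro init
    rw [show ((([x] : List Int).length : Int)) = 1 by simp,
      show PySem.List.pyRange 0 1 1 = [0] by decide]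
    simp [pvEvens, pvOdds, PySem.Int.mod, PySem.List.pyGetD]
  | case3 x y r ih =>
    intro init
    have hn : (((x :: y :: r).length : Int)) = (r.length : Int) + 2 := by
      simp [List.length_cons]; ring
    rw [hn]
    rw [PySem.List.pyRange_one_cons (by omega), PySem.List.pyRange_one_cons (by omega)]
    rw [List.foldl_cons, List.foldl_cons]
    have h0 : (if PySem.Int.mod 0 2 == 1 then init + PySem.List.pyGetD (x :: y :: r) 0 0 ^ 2
        else init + PySem.List.pyGetD (x :: y :: r) 0 0) = init + x := by
      simp [PySem.Int.mod, PySem.List.pyGetD_zero_cons]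
    have h1 : ∀ (c : Int), (if PySem.Int.mod (0 + 1) 2 == 1 then c + PySem.List.pyGetD (x :: y :: r) (0 + 1) 0 ^ 2
        else c + PySem.List.pyGetD (x :: y :: r) (0 + 1) 0) = c + y ^ 2 := by
      intro c; rw [show PySem.Int.mod (0 + 1) 2 = 1 by decide]
      norm_num [PySem.List.pyGetD]
    rw [h0, h1]
    -- shift the remaining range(2, m+2) down to range(0, m) over the tail
    have hshift : ∀ (c : Int),
        (PySem.List.pyRange (0 + 1 + 1) ((r.length : Int) + 2) 1).foldl
          (fun square_sum i =>
            if PySem.Int.mod i 2 == 1 then square_sum + PySem.List.pyGetD (x :: y :: r) i 0 ^ 2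
            else square_sum + PySem.List.pyGetD (x :: y :: r) i 0) c
        = (PySem.List.pyRange 0 (r.length : Int) 1).foldl
          (fun square_sum i =>
            if PySem.Int.mod i 2 == 1 then square_sum + PySem.List.pyGetD r i 0 ^ 2
            else square_sum + PySem.List.pyGetD r i 0) c := by
      intro c
      rw [PySem.List.pyRange_one, PySem.List.pyRange_one]
      have he : ((r.length : Int) + 2 - (0 + 1 + 1)).toNat = ((r.length : Int) - 0).toNat := by omega
      rw [he, List.foldl_map, List.foldl_map]
      apply PySem.List.foldl_congr_mem
      intro s k _
      have hk2 : (0 + 1 + 1 + (k : Int)) = (((k + 2 : Nat)) : Int) := by push_cast; ring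
      have hk0 : ((0 : Int) + (k : Int)) = ((k : Nat) : Int) := by ring
      rw [hk2, hk0]
      have hmod : PySem.Int.mod ((k + 2 : Nat) : Int) 2 = PySem.Int.mod ((k : Nat) : Int) 2 := by
        simp [PySem.Int.mod]
      have hget : PySem.List.pyGetD (x :: y :: r) ((k + 2 : Nat) : Int) 0 = PySem.List.pyGetD r ((k : Nat) : Int) 0 := by
        rw [PySem.List.pyGetD_natCast, PySem.List.pyGetD_natCast]
        simp [List.getD]
      rw [hmod, hget]
    rw [hshift]
    rw [ih (init + x + y ^ 2)]
    simp [pvEvens, pvOdds]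
    ring

-- ===== VERDICT (by name: the statement is the Claim_ definition above) =====
theorem alternate_sq_sum_spec : Claim_equal_alternate_sq_sum := by
  intro arr _
  unfold Spec_alternate_sq_sum alternate_sq_sum alternate_sq_sum_alt
  rw [sliceE, sliceO, loopA]
  simp
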